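-- pv_equiv track=rewrite | github.com/NullOnSpace/dst-qq | utils/dst/manage_server/parse_lua.py | is_end
-- ===== SOURCE A (Python) =====
-- def is_end(line):
--     opened = False
--     # first strip all quoted str
--     while True:
--         for ch in line:
--             if ch in ('"', "'"):
--                 idx1 = line.find(ch)
--                 rest = line[idx1+1:]
--                 idx2 = rest.find(ch)
--                 while True:
--                     if _is_backslashed(rest[:idx2]):
--                         rest_ = rest[idx2+1:]
--                         idx2 = rest_.find(ch) + idx2 + 1
--                     else:
--                         break
--                 line = line[:idx1] + line[idx1+idx2+2:]
--                 break
--         else: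
--             break
--     closed = 0
--     for ch in line:
--         if ch in ("{", "("):
--             closed += 1
--         elif ch in ("}", ")"):
--             closed -= 1
--     return not closed
--
-- def _is_backslashed(line):
--     if (len(line) - len(line.rstrip("\\")))%2 == 0:
--         return False
--     else:
--         return True
-- ===== SOURCE B (Python) =====
-- def is_end(line):
--     bal = 0
--     i, n = 0, len(line)
--     while i < n:
--         c = line[i]
--         if c in '"\'':
--             j = _skip_string(line, c, i + 1)
--             i = j if j is not None else i + 1
--         else:
--             if c in '{(':
--                 bal += 1
--             elif c in '})':
--                 bal -= 1
--             i += 1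
--     return bal == 0
--
--
-- def _skip_string(line, q, start):
--     """Index just past the next unescaped closing quote q, or None if unterminated."""
--     bs = 0
--     for k in range(start, len(line)):
--         c = line[k]
--         if c == q and bs % 2 == 0:
--             return k + 1
--         bs = bs + 1 if c == '\\' else 0
--     return None
-- ===== Notes on version B (the rewrite author's own statement) =====
-- stated objective: alternative
-- what changed: A repeatedly rescans the whole line from the start, excising one quoted segment per pass and rebuilding the line before counting braces; B is a single left-to-right scan that skips each quoted string in place while counting braces, never rebuilding the line.
import Mathlib
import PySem

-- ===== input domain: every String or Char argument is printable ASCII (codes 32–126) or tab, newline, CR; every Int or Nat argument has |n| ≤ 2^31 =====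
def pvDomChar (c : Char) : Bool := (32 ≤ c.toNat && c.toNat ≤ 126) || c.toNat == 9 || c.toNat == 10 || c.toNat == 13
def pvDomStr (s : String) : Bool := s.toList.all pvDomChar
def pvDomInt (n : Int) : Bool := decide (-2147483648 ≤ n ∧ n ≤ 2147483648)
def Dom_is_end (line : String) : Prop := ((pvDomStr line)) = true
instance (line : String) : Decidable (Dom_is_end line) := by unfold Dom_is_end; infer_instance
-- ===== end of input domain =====

-- B replaces A's repeated strip-and-rescan passes by one left-to-right scan over the line (objective: alternative).

-- ===== PORT A =====
-- str.find of a single character: index of first occurrence, or -1 (exact).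
def pyFindCh (l : List Char) (ch : Char) : Int :=
  match PySem.List.index? l ch with
  | some n => (n : Int)
  | none => -1

-- number of leading backslashes (applied to the reverse below, = trailing backslashes).
def tbRev : List Char → Nat
  | [] => 0
  | c :: cs => if c == '\\' then tbRev cs + 1 else 0

-- _is_backslashed: len(line) - len(line.rstrip("\\")) is the number of trailing
-- backslashes (= tbRev of the reverse); returns whether that count is odd (exact).
def pvIsBackslashed (l : List Char) : Bool := decide (tbRev l.reverse % 2 = 1)

-- the inner 'while True' of A (advances idx2 past backslashed closers); fueled: on inputs where
-- the Python loop terminates, idx2 strictly increases and is < rest.length, so fuel rest.length+1 suffices.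
def aFix (ch : Char) (rest : List Char) : Nat → Int → Int
  | 0, idx2 => idx2
  | f + 1, idx2 =>
    if pvIsBackslashed (PySem.List.slice rest none (some idx2)) then
      let rest_ := PySem.List.slice rest (some (idx2 + 1)) none
      aFix ch rest f (pyFindCh rest_ ch + idx2 + 1)
    else idx2

-- the outer 'while True' of A: each pass removes at least one character, so fuel length+1 suffices.
def aStrip : Nat → List Char → List Char
  | 0, line => line
  | f + 1, line =>
    match line.find? (fun c => c == '"' || c == '\'') with
    | none => line
    | some ch =>
      let idx1 := pyFindCh line ch
      let rest := PySem.List.slice line (some (idx1 + 1)) none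
      let idx2 := aFix ch rest (rest.length + 1) (pyFindCh rest ch)
      aStrip f (PySem.List.slice line none (some idx1) ++
                PySem.List.slice line (some (idx1 + idx2 + 2)) none)

def is_end (line : String) : Bool :=
  let l := aStrip (line.toList.length + 1) line.toList
  let closed := l.foldl (fun acc c =>
    if c == '{' || c == '(' then acc + 1
    else if c == '}' || c == ')' then acc - 1 else acc) (0 : Int)
  closed == 0

-- ===== PORT B =====
-- _skip_string: remainder just past the next unescaped closing quote, or none if unterminated.
def bSkip (q : Char) : List Char → Nat → Option (List Char)
  | [], _ => none
  | c :: cs, bs =>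
    if c == q && bs % 2 == 0 then some cs
    else bSkip q cs (if c == '\\' then bs + 1 else 0)

theorem bSkip_length {q : Char} : ∀ {l : List Char} {bs : Nat} {r : List Char},
    bSkip q l bs = some r → r.length < l.length := by
  intro l
  induction l with
  | nil => intro bs r h; simp [bSkip] at h
  | cons c cs ih =>
    intro bs r h
    simp only [bSkip] at h
    split at h
    · cases h; simp
    · exact Nat.lt_trans (ih h) (by simp)

theorem bSkip_getD_length (q : Char) (l : List Char) (bs : Nat) :
    ((bSkip q l bs).getD l).length ≤ l.length := by
  cases h : bSkip q l bs with
  | none => simp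
  | some r => simpa using Nat.le_of_lt (bSkip_length h)

-- the single pass of B: skip quoted strings (i = j if j is not None else i + 1), count braces.
def bScan : List Char → Int → Bool
  | [], bal => bal == 0
  | c :: cs, bal =>
    if c == '"' || c == '\'' then
      bScan ((bSkip c cs 0).getD cs) bal
    else
      bScan cs (bal + (if c == '{' || c == '(' then 1
                       else if c == '}' || c == ')' then -1 else 0))
termination_by l _ => l.length
decreasing_by
  · have h := bSkip_getD_length c cs 0
    simp only [List.length_cons]
    omega
  · simp

def is_end_alt (line : String) : Bool := bScan line.toList 0

-- ===== PRECONDITION & SPEC =====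
-- first unescaped closing quote q: the remainder just past it, or none (same grammar rule A and B read).
def pvClose (q : Char) : List Char → Nat → Option (List Char)
  | [], _ => none
  | c :: cs, bs =>
    if c == q && bs % 2 == 0 then some cs
    else pvClose q cs (if c == '\\' then bs + 1 else 0)

-- Well-formedness table of every suffix of the line (head = the whole line): a suffix is well
-- formed iff it has no quote, or its first quote q is closed by a later unescaped q and the
-- remainder after that close is well formed, or the rest of the suffix contains no q at all,
-- does not end (before its final character) in an odd run of backslashes, and is well formed.
def pvSafeTable : List Char → List Bool
  | [] => [true]
  | c :: cs =>
    let t := pvSafeTable cs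
    (if c == '"' || c == '\'' then
      match pvClose c cs 0 with
      | some r => t.getD (cs.length - r.length) true
      | none => decide (c ∉ cs) && decide (tbRev cs.dropLast.reverse % 2 = 0) && t.getD 0 true
     else t.getD 0 true) :: t

def pvScanSafe (l : List Char) : Bool := (pvSafeTable l).getD 0 true

-- Pre_ excludes exactly the lines on which the Python A never returns: a quoted string with no
-- unescaped closing quote whose content either still contains (escaped) closing-quote characters
-- or ends, before its last character, in an odd run of backslashes makes A's inner rescan loop
-- cycle forever.  On every input Pre_ admits, A returns and B matches it.
def Pre_is_end (line : String) : Prop := pvScanSafe line.toList = true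
instance (line : String) : Decidable (Pre_is_end line) := by unfold Pre_is_end; infer_instance
def pvWitness_is_end : String := "local s = {\"a\\\"{b\", ('c')}"
def Spec_is_end (line : String) (out : Bool) : Prop := out = is_end_alt line
instance (line : String) (out : Bool) : Decidable (Spec_is_end line out) := by unfold Spec_is_end; infer_instance

-- ===== CLAIM (what is proved, stated in full; the proofs are below) =====
def Claim_equal_is_end : Prop := ∀ (line : String), Dom_is_end line → Pre_is_end line → Spec_is_end line (is_end line)

-- ===== LEMMAS AND PROOFS =====
def isQ (c : Char) : Bool := c == '"' || c == '\''

def deltaBr (c : Char) : Int :=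
  if c == '{' || c == '(' then 1 else if c == '}' || c == ')' then -1 else 0

def sumBr (l : List Char) : Int := (l.map deltaBr).sum

-- backslash-run state B/A both thread through a string: length of the backslash run ending the list.
def bsRun (w : List Char) (bs : Nat) : Nat :=
  w.foldl (fun b c => if c == '\\' then b + 1 else 0) bs

theorem sumBr_cons (c : Char) (l : List Char) : sumBr (c :: l) = deltaBr c + sumBr l := by
  simp [sumBr]

theorem tbRev_all {l : List Char} (h : ∀ x ∈ l, x = '\\') : tbRev l = l.length := by
  induction l with
  | nil => rfl
  | cons c cs ih =>
    have hc : c = '\\' := h c (by simp)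
    simp [tbRev, hc, ih (fun x hx => h x (by simp [hx]))]

theorem tbRev_append_all {l : List Char} (t : List Char) (h : ∀ x ∈ l, x = '\\') :
    tbRev (l ++ t) = l.length + tbRev t := by
  induction l with
  | nil => simp
  | cons c cs ih =>
    have hc : c = '\\' := h c (by simp)
    simp [tbRev, hc, ih (fun x hx => h x (by simp [hx]))]
    omega

theorem tbRev_append_not_all {l : List Char} (t : List Char) (h : ∃ x ∈ l, x ≠ '\\') :
    tbRev (l ++ t) = tbRev l := by
  induction l with
  | nil => simp at h
  | cons c cs ih =>
    by_cases hc : c = '\\'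
    · rcases h with ⟨x, hx, hxne⟩
      rcases List.mem_cons.mp hx with rfl | hx'
      · exact absurd hc hxne
      · simp [tbRev, hc, ih ⟨x, hx', hxne⟩]
    · simp [tbRev, hc]

theorem bsRun_cons (c : Char) (cs : List Char) (bs : Nat) :
    bsRun (c :: cs) bs = bsRun cs (if c == '\\' then bs + 1 else 0) := rfl

theorem exists_not_bs_of_not_all {cs : List Char}
    (hall : ¬(cs.all fun c => c == '\\') = true) : ∃ x ∈ cs.reverse, x ≠ '\\' := by
  simp only [List.all_eq_true] at hall
  push_neg at hall
  rcases hall with ⟨x, hx, hxne⟩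
  exact ⟨x, by simp [hx], by simpa using hxne⟩

theorem bsRun_eq : ∀ (w : List Char) (bs : Nat),
    bsRun w bs = if w.all (fun c => c == '\\') then bs + w.length else tbRev w.reverse := by
  intro w
  induction w with
  | nil => intro bs; simp [bsRun]
  | cons c cs ih =>
    intro bs
    rw [bsRun_cons, ih]
    by_cases hc : c = '\\' <;> by_cases hall : (cs.all fun x => x == '\\') = true
    · subst hc
      simp [hall]
      omega
    · subst hc
      have hex := exists_not_bs_of_not_all hall
      simp only [List.reverse_cons]
      rw [tbRev_append_not_all _ hex]
      simp [hall]
    · have h1 : ∀ x ∈ cs.reverse, x = '\\' := by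
        simp only [List.all_eq_true] at hall
        intro x hx
        simpa using hall x (by simpa using hx)
      simp only [List.reverse_cons]
      rw [tbRev_append_all _ h1]
      simp [hall, tbRev, hc]
    · have hex := exists_not_bs_of_not_all hall
      simp only [List.reverse_cons]
      rw [tbRev_append_not_all _ hex]
      simp [hall, hc]

theorem tbRev_reverse_eq_bsRun (w : List Char) : tbRev w.reverse = bsRun w 0 := by
  rw [bsRun_eq]
  by_cases hall : w.all (fun c => c == '\\') = true
  · rw [if_pos hall, tbRev_all (by
      intro x hx
      simp only [List.all_eq_true] at hall
      simpa using hall x (by simpa using hx))]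
    simp
  · rw [if_neg hall]

theorem bsRun_append (x y : List Char) (b : Nat) : bsRun (x ++ y) b = bsRun y (bsRun x b) := by
  simp [bsRun, List.foldl_append]

theorem bSkip_cons_self {q : Char} (hq : q ≠ '\\') (v : List Char) (bs : Nat) :
    bSkip q (q :: v) bs = if bs % 2 == 0 then some v else bSkip q v 0 := by
  by_cases h : (bs % 2 == 0) = true
  · simp [bSkip, h]
  · simp only [Bool.not_eq_true] at h
    simp [bSkip, h, hq]

theorem bSkip_not_mem {q : Char} : ∀ {l : List Char} (bs : Nat), q ∉ l → bSkip q l bs = none := by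
  intro l
  induction l with
  | nil => intro bs _; rfl
  | cons c cs ih =>
    intro bs h
    have hcq : (c == q) = false := by
      simp only [beq_eq_false_iff_ne]; intro hc; exact h (by simp [hc])
    simp only [bSkip, hcq, Bool.false_and, if_neg Bool.false_ne_true]
    exact ih _ (fun hm => h (by simp [hm]))

theorem bSkip_append {q : Char} : ∀ {w : List Char}, q ∉ w →
    ∀ (rest : List Char) (bs : Nat), bSkip q (w ++ rest) bs = bSkip q rest (bsRun w bs) := by
  intro w
  induction w with
  | nil => intro _ rest bs; simp [bsRun]
  | cons c cs ih =>
    intro h rest bs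
    have hcq : (c == q) = false := by
      simp only [beq_eq_false_iff_ne]; intro hc; exact h (by simp [hc])
    rw [List.cons_append]
    simp only [bSkip, hcq, Bool.false_and, if_neg Bool.false_ne_true]
    rw [ih (fun hm => h (by simp [hm])), bsRun_cons]

theorem bSkip_decomp {q : Char} : ∀ {l : List Char} {bs : Nat} {r : List Char},
    bSkip q l bs = some r → ∃ u, l = u ++ q :: r := by
  intro l
  induction l with
  | nil => intro bs r h; simp [bSkip] at h
  | cons c cs ih =>
    intro bs r h
    simp only [bSkip] at h
    split at h
    · rename_i hc
      have : c = q := by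
        have := (Bool.and_eq_true _ _).mp hc
        exact eq_of_beq this.1
      cases h
      exact ⟨[], by simp [this]⟩
    · rcases ih h with ⟨u, hu⟩
      exact ⟨c :: u, by simp [hu]⟩

theorem bScan_shift : ∀ (pre : List Char), (∀ c ∈ pre, isQ c = false) →
    ∀ (rest : List Char) (bal : Int), bScan (pre ++ rest) bal = bScan rest (bal + sumBr pre) := by
  intro pre
  induction pre with
  | nil => intro _ rest bal; simp [sumBr]
  | cons c t ih =>
    intro h rest bal
    have hc : isQ c = false := h c (by simp)
    have hq : (c == '"' || c == '\'') = false := hc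
    rw [List.cons_append, bScan, if_neg (by simp [hq])]
    rw [ih (fun x hx => h x (by simp [hx])) rest]
    rw [sumBr_cons]
    congr 1
    simp [deltaBr]
    ring

theorem bScan_no_quote : ∀ (l : List Char), (∀ c ∈ l, isQ c = false) →
    ∀ (bal : Int), bScan l bal = ((bal + sumBr l) == 0) := by
  intro l hl bal
  rw [show l = l ++ [] by simp] at *
  rw [bScan_shift l (fun c hc => hl c (by simpa using hc)) [] bal]
  simp [bScan]

theorem find?_quote_split (pre : List Char) (hpre : ∀ c ∈ pre, isQ c = false)
    (q : Char) (hq : isQ q = true) (suf : List Char) :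
    (pre ++ q :: suf).find? (fun c => c == '"' || c == '\'') = some q := by
  induction pre with
  | nil =>
    have hq' : (q == '"' || q == '\'') = true := hq
    simp [hq']
  | cons c t ih =>
    have hc : isQ c = false := hpre c (by simp)
    rw [List.cons_append, List.find?]
    simp only [isQ] at hc
    rw [hc]
    exact ih (fun x hx => hpre x (by simp [hx]))

theorem quote_split (l : List Char) :
    (∀ c ∈ l, isQ c = false) ∨
    ∃ pre q suf, l = pre ++ q :: suf ∧ (∀ c ∈ pre, isQ c = false) ∧ isQ q = true := by
  induction l with
  | nil => left; simp
  | cons c t ih =>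
    by_cases hc : isQ c = true
    · right; exact ⟨[], c, t, by simp, by simp, hc⟩
    · have hc' : isQ c = false := by revert hc; cases isQ c <;> simp
      rcases ih with h | ⟨pre, q, suf, rfl, hpre, hq⟩
      · left; intro x hx
        rcases List.mem_cons.mp hx with rfl | hx
        · exact hc'
        · exact h x hx
      · right
        exact ⟨c :: pre, q, suf, by simp, by
          intro x hx
          rcases List.mem_cons.mp hx with rfl | hx
          · exact hc'
          · exact hpre x hx, hq⟩

theorem pyFindCh_split (pre : List Char) (q : Char) (hq : q ∉ pre) (suf : List Char) :
    pyFindCh (pre ++ q :: suf) q = (pre.length : Int) := by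
  have h : PySem.List.index? (pre ++ q :: suf) q = some pre.length :=
    (PySem.List.index?_eq_some_iff _ _ _).mpr ⟨pre, suf, rfl, rfl, hq⟩
  unfold pyFindCh
  rw [h]

theorem pyFindCh_none (l : List Char) (q : Char) (hq : q ∉ l) : pyFindCh l q = -1 := by
  unfold pyFindCh
  rw [show PySem.List.index? l q = none from (PySem.List.index?_eq_none_iff _ _).mpr hq]

theorem mem_split_of_mem {q : Char} {l : List Char} (h : q ∈ l) :
    ∃ s1 s2, l = s1 ++ q :: s2 ∧ q ∉ s1 := by
  have hs : (PySem.List.index? l q).isSome := (PySem.List.index?_isSome_iff _ _).mpr h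
  rcases Option.isSome_iff_exists.mp hs with ⟨k, hk⟩
  rcases (PySem.List.index?_eq_some_iff _ _ _).mp hk with ⟨s1, s2, rfl, _, hq⟩
  exact ⟨s1, s2, rfl, hq⟩

theorem isQ_ne_bs {q : Char} (h : isQ q = true) : q ≠ '\\' := by
  rcases Bool.or_eq_true_iff.mp h with h1 | h1 <;>
    (have := eq_of_beq h1; subst this; decide)

-- A's inner escaped-closer loop lands on the first unescaped closing quote.
theorem aFix_eval {q : Char} (hq : q ≠ '\\') :
    ∀ (f : Nat) (v w s2 : List Char), v.length < f →
    bSkip q (q :: v) (bsRun w 0) = some s2 →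
    aFix q (w ++ q :: v) f (w.length : Int) = (w.length : Int) + v.length - s2.length := by
  intro f
  induction f with
  | zero => intro v w s2 h _; omega
  | succ f ih =>
    intro v w s2 hlen hskip
    have htake : PySem.List.slice (w ++ q :: v) none (some (w.length : Int)) = w := by
      rw [PySem.List.slice_to_natCast]
      exact List.take_left' rfl
    rw [bSkip_cons_self hq] at hskip
    by_cases hpar : (bsRun w 0) % 2 = 0
    · -- unescaped: loop exits here, s2 = v
      have hval : pvIsBackslashed w = false := by
        simp [pvIsBackslashed, tbRev_reverse_eq_bsRun, hpar]
      have hs2 : s2 = v := by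
        rw [if_pos (by simpa using hpar)] at hskip
        exact (Option.some.injEq _ _).mp hskip.symm
      rw [aFix, htake, hval]
      simp [hs2]
    · -- escaped: step to the next occurrence of q
      have hval : pvIsBackslashed w = true := by
        simp only [pvIsBackslashed, tbRev_reverse_eq_bsRun]
        simp
        omega
      rw [if_neg (by simpa using hpar)] at hskip
      have hqv : q ∈ v := by
        by_contra hm
        rw [bSkip_not_mem _ hm] at hskip
        simp at hskip
      rcases mem_split_of_mem hqv with ⟨u, v', rfl, hqu⟩
      have hrest : PySem.List.slice (w ++ q :: (u ++ q :: v'))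
          (some ((w.length : Int) + 1)) none = u ++ q :: v' := by
        have h1 : ((w.length : Int) + 1) = (((w.length + 1 : Nat)) : Int) := by push_cast; ring
        rw [h1, PySem.List.slice_from_natCast]
        rw [show w ++ q :: (u ++ q :: v') = (w ++ [q]) ++ (u ++ q :: v') by simp]
        exact List.drop_left' (by simp)
      have hfind : pyFindCh (u ++ q :: v') q = (u.length : Int) := pyFindCh_split u q hqu v'
      rw [aFix, htake, hval, if_pos rfl]
      simp only [hrest, hfind]
      have hlist : w ++ q :: (u ++ q :: v') = (w ++ q :: u) ++ q :: v' := by simp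
      have hidx : (u.length : Int) + (w.length : Int) + 1 = (((w ++ q :: u).length : Nat) : Int) := by
        simp [List.length_append]
        push_cast
        ring
      rw [hlist, hidx]
      have hbs : bsRun (w ++ q :: u) 0 = bsRun u 0 := by
        rw [bsRun_append]
        rw [show bsRun (q :: u) (bsRun w 0) = bsRun u 0 from by simp [bsRun, hq]]
      have hskip' : bSkip q (q :: v') (bsRun (w ++ q :: u) 0) = some s2 := by
        rw [hbs]
        rw [bSkip_append hqu] at hskip
        exact hskip
      have hlen' : v'.length < f := by
        simp only [List.length_append, List.length_cons] at hlen ⊢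
        omega
      rw [ih v' (w ++ q :: u) s2 hlen' hskip']
      simp only [List.length_append, List.length_cons]
      push_cast
      ring

theorem aFix_neg_one (q : Char) (s : List Char) (f : Nat)
    (h : pvIsBackslashed s.dropLast = false) : aFix q s (f + 1) (-1) = -1 := by
  rw [aFix, PySem.List.slice_to_neg_one, h]
  simp

-- characterization of the safety table
theorem pvSafeTable_getD : ∀ (l : List Char) (j : Nat), j ≤ l.length →
    (pvSafeTable l).getD j true = pvScanSafe (l.drop j) := by
  intro l
  induction l with
  | nil =>
    intro j hj
    have hj0 : j = 0 := by simpa using hj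
    subst hj0
    simp [pvSafeTable, pvScanSafe]
  | cons c cs ih =>
    intro j hj
    cases j with
    | zero => simp [pvScanSafe]
    | succ j =>
      rw [show (pvSafeTable (c :: cs)).getD (j + 1) true
            = (pvSafeTable cs).getD j true from by simp only [pvSafeTable]; rfl]
      rw [ih j (by simpa using hj)]
      simp

theorem pvClose_eq_bSkip (q : Char) : ∀ (l : List Char) (bs : Nat),
    pvClose q l bs = bSkip q l bs := by
  intro l
  induction l with
  | nil => intro bs; rfl
  | cons c cs ih => intro bs; simp only [pvClose, bSkip]; split <;> simp [ih]

theorem scanSafe_cons_nonquote {c : Char} (hc : isQ c = false) (cs : List Char) :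
    pvScanSafe (c :: cs) = pvScanSafe cs := by
  have hc' : (c == '"' || c == '\'') = false := hc
  simp only [pvScanSafe, pvSafeTable]
  simp [hc']

theorem scanSafe_cons_quote_some {q : Char} (hq : isQ q = true) {s r : List Char}
    (h : bSkip q s 0 = some r) : pvScanSafe (q :: s) = pvScanSafe r := by
  have hq' : (q == '"' || q == '\'') = true := hq
  have hclose : pvClose q s 0 = some r := by rw [pvClose_eq_bSkip]; exact h
  rcases bSkip_decomp h with ⟨u, rfl⟩
  have hlen : (u ++ q :: r).length - r.length = u.length + 1 := by simp; omega
  have hdrop : (u ++ q :: r).drop (u.length + 1) = r := by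
    rw [show u ++ q :: r = (u ++ [q]) ++ r by simp]
    exact List.drop_left' (by simp)
  have := pvSafeTable_getD (u ++ q :: r) (u.length + 1) (by simp)
  rw [hdrop] at this
  simp only [pvScanSafe, pvSafeTable, hq', hclose, List.getD_cons_zero, if_true]
  rw [hlen]
  exact this

theorem scanSafe_cons_quote_none {q : Char} (hq : isQ q = true) {s : List Char}
    (h : bSkip q s 0 = none) : pvScanSafe (q :: s)
      = (decide (q ∉ s) && decide (tbRev s.dropLast.reverse % 2 = 0) && pvScanSafe s) := by
  have hq' : (q == '"' || q == '\'') = true := hq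
  have hclose : pvClose q s 0 = none := by rw [pvClose_eq_bSkip]; exact h
  simp only [pvScanSafe, pvSafeTable, hq', hclose, List.getD_cons_zero, if_true]

theorem scanSafe_append : ∀ (pre : List Char), (∀ c ∈ pre, isQ c = false) →
    ∀ (rest : List Char), pvScanSafe (pre ++ rest) = pvScanSafe rest := by
  intro pre
  induction pre with
  | nil => intro _ rest; simp
  | cons c t ih =>
    intro h rest
    rw [List.cons_append, scanSafe_cons_nonquote (h c (by simp))]
    exact ih (fun x hx => h x (by simp [hx])) rest

-- A's brace-counting fold is the running sum of deltaBr
theorem countFold_eq_sumBr (l : List Char) :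
    (l.foldl (fun acc c =>
      if c == '{' || c == '(' then acc + 1
      else if c == '}' || c == ')' then acc - 1 else acc) (0 : Int)) = sumBr l := by
  have h : ∀ (acc : Int) (c : Char), c ∈ l →
      (if c == '{' || c == '(' then acc + 1
       else if c == '}' || c == ')' then acc - 1 else acc) = acc + deltaBr c := by
    intro acc c _
    simp only [deltaBr]
    split_ifs <;> ring
  rw [PySem.List.foldl_congr_mem l _ (fun acc c => acc + deltaBr c) 0 h,
      PySem.List.foldl_add]
  simp [sumBr]

theorem main_invariant : ∀ (f : Nat) (l : List Char) (bal : Int),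
    pvScanSafe l = true → l.length < f →
    bScan l bal = ((bal + sumBr (aStrip f l)) == 0) := by
  intro f
  induction f with
  | zero => intro l bal _ h; omega
  | succ f ih =>
    intro l bal hsafe hlen
    rcases quote_split l with hfree | ⟨pre, q, suf, rfl, hpre, hq⟩
    · have hfind : l.find? (fun c => c == '"' || c == '\'') = none := by
        apply List.find?_eq_none.mpr
        intro x hx
        have := hfree x hx
        simpa [isQ] using this
      rw [show aStrip (f + 1) l = l by simp [aStrip, hfind]]
      exact bScan_no_quote l hfree bal
    · -- common facts
      have hqpre : q ∉ pre := fun hm => by simp [hpre q hm] at hq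
      have hqbs : q ≠ '\\' := isQ_ne_bs hq
      have hfind := find?_quote_split pre hpre q hq suf
      have hidx1 := pyFindCh_split pre q hqpre suf
      have hrest : PySem.List.slice (pre ++ q :: suf) (some ((pre.length : Int) + 1)) none = suf := by
        have h1 : ((pre.length : Int) + 1) = (((pre.length + 1 : Nat)) : Int) := by push_cast; ring
        rw [h1, PySem.List.slice_from_natCast]
        rw [show pre ++ q :: suf = (pre ++ [q]) ++ suf by simp]
        exact List.drop_left' (by simp)
      have htake : PySem.List.slice (pre ++ q :: suf) none (some (pre.length : Int)) = pre := by
        rw [PySem.List.slice_to_natCast]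
        exact List.take_left' rfl
      have hsafe' : pvScanSafe (q :: suf) = true := by
        rw [← scanSafe_append pre hpre (q :: suf)]; exact hsafe
      have hBshift := bScan_shift pre hpre (q :: suf) bal
      cases hskip : bSkip q suf 0 with
      | some s2 =>
        -- the string is closed by an unescaped quote
        rcases bSkip_decomp hskip with ⟨s1, rfl⟩
        have hqsuf : q ∈ s1 ++ q :: s2 := by simp
        rcases mem_split_of_mem hqsuf with ⟨w, v, hwv, hqw⟩
        have hlwv : w.length + 1 + v.length = s1.length + 1 + s2.length := by
          have hl := congrArg List.length hwv
          simp only [List.length_append, List.length_cons] at hl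
          omega
        have hskip' : bSkip q (q :: v) (bsRun w 0) = some s2 := by
          have h0 : bSkip q (w ++ q :: v) 0 = some s2 := by rw [← hwv]; exact hskip
          rw [bSkip_append hqw] at h0
          exact h0
        have hidx2 : aFix q (s1 ++ q :: s2) ((s1 ++ q :: s2).length + 1)
            (pyFindCh (s1 ++ q :: s2) q) = (s1.length : Int) := by
          conv_lhs => rw [hwv]
          rw [pyFindCh_split w q hqw v,
              aFix_eval hqbs ((w ++ q :: v).length + 1) v w s2
                (by simp only [List.length_append, List.length_cons]; omega) hskip']
          push_cast
          omega
        -- A: one pass removes the quoted segment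
        have hdrop : PySem.List.slice (pre ++ q :: (s1 ++ q :: s2))
            (some ((pre.length : Int) + (s1.length : Int) + 2)) none = s2 := by
          have h1 : ((pre.length : Int) + (s1.length : Int) + 2)
              = (((pre.length + s1.length + 2 : Nat)) : Int) := by push_cast; ring
          rw [h1, PySem.List.slice_from_natCast]
          rw [show pre ++ q :: (s1 ++ q :: s2) = (pre ++ q :: s1 ++ [q]) ++ s2 by simp]
          exact List.drop_left' (by simp; omega)
        have hA : aStrip (f + 1) (pre ++ q :: (s1 ++ q :: s2)) = aStrip f (pre ++ s2) := by
          rw [aStrip]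
          rw [hfind]
          simp only [hidx1, hrest, hidx2]
          rw [htake, hdrop]
        -- B: the scan skips the same segment
        have hB : bScan (q :: (s1 ++ q :: s2)) (bal + sumBr pre) = bScan s2 (bal + sumBr pre) := by
          rw [bScan, if_pos (by simpa [isQ] using hq), hskip]
          rfl
        have hsafe2 : pvScanSafe (pre ++ s2) = true := by
          rw [scanSafe_append pre hpre]
          rw [scanSafe_cons_quote_some hq hskip] at hsafe'
          exact hsafe'
        have hlen' : (pre ++ s2).length < f := by
          simp only [List.length_append, List.length_cons] at hlen ⊢
          omega
        have hIH := ih (pre ++ s2) bal hsafe2 hlen'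
        rw [hBshift, hB, hA, ← bScan_shift pre hpre s2 bal, hIH]
      | none =>
        -- unterminated: safety gives q ∉ suf and even trailing backslashes before the last char
        rw [scanSafe_cons_quote_none hq hskip] at hsafe'
        have hparts := hsafe'
        simp only [Bool.and_eq_true, decide_eq_true_eq] at hparts
        obtain ⟨⟨hmem, hpar⟩, hsafesuf⟩ := hparts
        have hidx2 := pyFindCh_none suf q hmem
        have hbs : pvIsBackslashed suf.dropLast = false := by
          simp [pvIsBackslashed, hpar]
        have hdrop1 : PySem.List.slice (pre ++ q :: suf)
            (some ((pre.length : Int) + (-1) + 2)) none = suf := by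
          have h1 : ((pre.length : Int) + (-1) + 2) = (((pre.length + 1 : Nat)) : Int) := by
            push_cast; ring
          rw [h1, PySem.List.slice_from_natCast]
          rw [show pre ++ q :: suf = (pre ++ [q]) ++ suf by simp]
          exact List.drop_left' (by simp)
        have hA : aStrip (f + 1) (pre ++ q :: suf) = aStrip f (pre ++ suf) := by
          rw [aStrip]
          rw [hfind]
          simp only [hidx1, hrest, hidx2]
          rw [aFix_neg_one q suf suf.length hbs]
          rw [htake, hdrop1]
        have hB : bScan (q :: suf) (bal + sumBr pre) = bScan suf (bal + sumBr pre) := by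
          rw [bScan, if_pos (by simpa [isQ] using hq), hskip]
          rfl
        have hsafe2 : pvScanSafe (pre ++ suf) = true := by
          rw [scanSafe_append pre hpre]
          exact hsafesuf
        have hlen' : (pre ++ suf).length < f := by
          simp only [List.length_append, List.length_cons] at hlen ⊢
          omega
        have hIH := ih (pre ++ suf) bal hsafe2 hlen'
        rw [hBshift, hB, hA, ← bScan_shift pre hpre suf bal, hIH]

-- ===== VERDICT (by name: the statement is the Claim_ definition above) =====
theorem is_end_spec : Claim_equal_is_end := by
  intro line _ hpre
  unfold Spec_is_end is_end_alt
  show (((aStrip (line.toList.length + 1) line.toList).foldl (fun acc c =>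
      if c == '{' || c == '(' then acc + 1
      else if c == '}' || c == ')' then acc - 1 else acc) (0 : Int)) == 0)
    = bScan line.toList 0
  rw [countFold_eq_sumBr,
      main_invariant (line.toList.length + 1) line.toList 0 hpre (by omega)]
  norm_num
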